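-- pv_equiv track=rewrite | github.com/yubin-park/hccpy | hccpy/_I0V05ED2.py | apply_agesex_edits
-- ===== SOURCE A (Python) =====
-- def apply_agesex_edits(cc_dct, age, sex):
--
--     # age/sex edits. see "I0V05ED2.TXT"
--     elst0 = ["C9100","C9101","C9102",
--               "C9500","C9501","C9502",
--               "C7400","C7401","C7402","C7410","C7411","C7412",
--               "C7490","C7491","C7492"]
--     elst1 = ["J410","J411","J418","J42","J440","J441"]
--     elst2 = ["K55011","K55012","K55019","K55021","K55022",
--               "K55029","K55031","K55032","K55039","K55041","K55042",
--               "K55049","K55051","K55052","K55059","K55061","K55062",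
--               "K55069","K5530", "K5531", "K5532", "K5533"]
--     elst3 = ["C50011","C50012","C50019","C50021","C50022","C50029",
--               "C50111","C50112","C50119","C50121","C50122","C50129",
--               "C50211","C50212","C50219","C50221","C50222","C50229",
--               "C50311","C50312","C50319","C50321","C50322","C50329",
--               "C50411","C50412","C50419","C50421","C50422","C50429",
--               "C50511","C50512","C50519","C50521","C50522","C50529",
--               "C50611","C50612","C50619","C50621","C50622","C50629",
--               "C50811","C50812","C50819","C50821","C50822","C50829",
--               "C50911","C50912","C50919","C50921","C50922","C50929"]
--     elst4 = ["J430","J431","J432","J438","J439","J449","J982",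
--                 "J983"]
--     elst5 = ["P0500","P0501","P0502","P0503","P0504","P0505",
--               "P0506","P0507","P0508","P0509","P0510","P0511",
--               "P0512","P0513","P0514","P0515","P0516","P0517",
--               "P0518","P0519","P052", "P059", "P0700","P0701",
--               "P0702","P0703","P0710","P0714","P0715","P0716",
--               "P0717","P0718","P0720","P0721","P0722","P0723",
--               "P0724","P0725","P0726","P0730","P0731","P0732",
--               "P0733","P0734","P0735","P0736","P0737","P0738",
--               "P0739","P080", "P081", "P0821","P0822"]
--     elst6 = ["Q894"]
--     elst7 = ["K551","K558","K559",
--               "P041", "P0411","P0412","P0413","P0414","P0415",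
--               "P0416","P0417","P0418","P0419","P041A",
--               "P042", "P043", "P0440","P0441","P0442","P0449",
--               "P045", "P046", "P048", "P0481","P0489",
--               "P049", "P930", "P938", "P961", "P962",
--               "Q390", "Q391", "Q392", "Q393", "Q394", "Q6410",
--               "Q6411","Q6412","Q6419","Q790", "Q791", "Q792",
--               "Q793", "Q794", "Q7951"]
--     elst8 = ["P270","P271","P278","P279"]
--     elst9 = ["F3481"]
--     elst10 = ["D66","D67"]
--
--     if age < 18:
--         for dx in (dx for dx in elst0 if dx in cc_dct):
--             cc_dct[dx] = "HHS_HCC009"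
--         for dx in (dx for dx in elst1 if dx in cc_dct):
--             cc_dct[dx] = "HHS_HCC161"
--     if age < 2:
--         for dx in (dx for dx in elst2 if dx in cc_dct):
--             cc_dct[dx] = "HHS_HCC042"
--         for dx in (dx for dx in elst4 if dx in cc_dct):
--             cc_dct[dx] = "HHS_HCC_NA"
--     if age < 50:
--         for dx in (dx for dx in elst3 if dx in cc_dct):
--             cc_dct[dx] = "HHS_HCC011"
--     if age > 1:
--         for dx in (dx for dx in elst5 if dx in cc_dct):
--             cc_dct[dx] = "HHS_HCC_NA"
--     if age >= 1:
--         for dx in (dx for dx in elst6 if dx in cc_dct):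
--             cc_dct[dx] = "HHS_HCC097"
--     if age >= 2:
--         for dx in (dx for dx in elst7 if dx in cc_dct):
--             cc_dct[dx] = "HHS_HCC_NA"
--         for dx in (dx for dx in elst8 if dx in cc_dct):
--             cc_dct[dx] = "HHS_HCC162"
--     if age < 6 or age > 18:
--         for dx in (dx for dx in elst9 if dx in cc_dct):
--             cc_dct[dx] = "HHS_HCC_NA"
--     if sex == "F":
--         for dx in (dx for dx in elst10 if dx in cc_dct):
--             cc_dct[dx] = "HHS_HCC075"
--
--     cc_dct = {dx:cc for dx, cc in cc_dct.items() if cc != "HHS_HCC_NA"}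
--
--     return cc_dct
-- ===== SOURCE B (Python) =====
-- def apply_agesex_edits(cc_dct, age, sex):
--     # Generate the regular code families instead of spelling out every code,
--     # then classify each diagnosis key once (checking the LATER edit blocks
--     # first, since in the reference the last active block wins), mutating
--     # cc_dct in place, and finally drop every HHS_HCC_NA entry.
--     e0 = [p + d for p in ("C910", "C950") for d in "012"] \
--         + ["C74" + t + d for t in "019" for d in "012"]
--     e1 = ["J410", "J411", "J418", "J42", "J440", "J441"]
--     e2 = ["K550" + t + d for t in "123456" for d in "129"] \
--         + ["K553" + d for d in "0123"]
--     e3 = ["C50" + a + b + c for a in "012345689" for b in "12" for c in "129"]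
--     e4 = ["J43" + d for d in "01289"] + ["J449", "J982", "J983"]
--     e5 = ["P05" + a + b for a in "01" for b in "0123456789"] \
--         + ["P052", "P059"] \
--         + ["P070" + d for d in "0123"] \
--         + ["P071" + d for d in "045678"] \
--         + ["P072" + d for d in "0123456"] \
--         + ["P073" + d for d in "0123456789"] \
--         + ["P080", "P081", "P0821", "P0822"]
--     e6 = ["Q894"]
--     e7 = ["K55" + d for d in "189"] \
--         + ["P041" + s for s in ["", "1", "2", "3", "4", "5", "6", "7", "8", "9", "A"]] \
--         + ["P042", "P043"] \
--         + ["P044" + d for d in "0129"] \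
--         + ["P045", "P046", "P048", "P0481", "P0489", "P049"] \
--         + ["P930", "P938", "P961", "P962"] \
--         + ["Q39" + d for d in "01234"] \
--         + ["Q641" + d for d in "0129"] \
--         + ["Q79" + d for d in "01234"] \
--         + ["Q7951"]
--     e8 = ["P27" + d for d in "0189"]
--     e9 = ["F3481"]
--     e10 = ["D66", "D67"]
--
--     def classify(dx):
--         # later blocks of the reference take precedence, so test them first
--         if sex == "F" and dx in e10:
--             return "HHS_HCC075"
--         if (age < 6 or age > 18) and dx in e9:
--             return "HHS_HCC_NA"
--         if age >= 2 and dx in e8: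
--             return "HHS_HCC162"
--         if age >= 2 and dx in e7:
--             return "HHS_HCC_NA"
--         if age >= 1 and dx in e6:
--             return "HHS_HCC097"
--         if age > 1 and dx in e5:
--             return "HHS_HCC_NA"
--         if age < 50 and dx in e3:
--             return "HHS_HCC011"
--         if age < 2 and dx in e4:
--             return "HHS_HCC_NA"
--         if age < 2 and dx in e2:
--             return "HHS_HCC042"
--         if age < 18 and dx in e1:
--             return "HHS_HCC161"
--         if age < 18 and dx in e0:
--             return "HHS_HCC009"
--         return None
--
--     for dx in list(cc_dct):
--         lab = classify(dx)
--         if lab is not None: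
--             cc_dct[dx] = lab
--     return {dx: cc for dx, cc in cc_dct.items() if cc != "HHS_HCC_NA"}
-- ===== Notes on version B (the rewrite author's own statement) =====
-- stated objective: alternative
-- what changed: B inverts the traversal: instead of scanning each fixed code list and rewriting matching dict entries block by block, it generates the regular code families programmatically and classifies each diagnosis key of cc_dct once with a first-match rule over the edit blocks in reverse order (sound because in A the last active block wins), then filters HHS_HCC_NA.
import Mathlib
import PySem

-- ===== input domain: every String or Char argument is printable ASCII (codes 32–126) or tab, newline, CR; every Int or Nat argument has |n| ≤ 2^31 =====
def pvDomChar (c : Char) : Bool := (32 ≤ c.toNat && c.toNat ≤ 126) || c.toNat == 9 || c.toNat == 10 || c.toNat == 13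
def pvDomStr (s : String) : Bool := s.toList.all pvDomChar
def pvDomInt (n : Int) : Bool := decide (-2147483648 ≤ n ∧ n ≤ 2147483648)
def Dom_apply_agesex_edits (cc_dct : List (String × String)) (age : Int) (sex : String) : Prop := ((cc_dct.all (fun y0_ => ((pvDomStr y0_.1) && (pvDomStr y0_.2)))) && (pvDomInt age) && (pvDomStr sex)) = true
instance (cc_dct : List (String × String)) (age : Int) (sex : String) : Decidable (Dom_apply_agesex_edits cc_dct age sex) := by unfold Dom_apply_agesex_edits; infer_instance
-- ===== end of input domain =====

-- B inverts A's traversal: it generates the regular code families programmatically and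
-- classifies each key of cc_dct once (first match over the blocks in reverse order, since
-- in A the last active block wins); objective: alternative decomposition, no speed claim.
-- Both Pythons mutate the argument dict in place identically; the equivalence proved here
-- is about the RETURN value.

-- ===== PORT A =====
def pvElst0 : List String := ["C9100","C9101","C9102","C9500","C9501","C9502","C7400","C7401","C7402","C7410","C7411","C7412","C7490","C7491","C7492"]
def pvElst1 : List String := ["J410","J411","J418","J42","J440","J441"]
def pvElst2 : List String := ["K55011","K55012","K55019","K55021","K55022","K55029","K55031","K55032","K55039","K55041","K55042","K55049","K55051","K55052","K55059","K55061","K55062","K55069","K5530","K5531","K5532","K5533"]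
def pvElst3 : List String := ["C50011","C50012","C50019","C50021","C50022","C50029","C50111","C50112","C50119","C50121","C50122","C50129","C50211","C50212","C50219","C50221","C50222","C50229","C50311","C50312","C50319","C50321","C50322","C50329","C50411","C50412","C50419","C50421","C50422","C50429","C50511","C50512","C50519","C50521","C50522","C50529","C50611","C50612","C50619","C50621","C50622","C50629","C50811","C50812","C50819","C50821","C50822","C50829","C50911","C50912","C50919","C50921","C50922","C50929"]
def pvElst4 : List String := ["J430","J431","J432","J438","J439","J449","J982","J983"]
def pvElst5 : List String := ["P0500","P0501","P0502","P0503","P0504","P0505","P0506","P0507","P0508","P0509","P0510","P0511","P0512","P0513","P0514","P0515","P0516","P0517","P0518","P0519","P052","P059","P0700","P0701","P0702","P0703","P0710","P0714","P0715","P0716","P0717","P0718","P0720","P0721","P0722","P0723","P0724","P0725","P0726","P0730","P0731","P0732","P0733","P0734","P0735","P0736","P0737","P0738","P0739","P080","P081","P0821","P0822"]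
def pvElst6 : List String := ["Q894"]
def pvElst7 : List String := ["K551","K558","K559","P041","P0411","P0412","P0413","P0414","P0415","P0416","P0417","P0418","P0419","P041A","P042","P043","P0440","P0441","P0442","P0449","P045","P046","P048","P0481","P0489","P049","P930","P938","P961","P962","Q390","Q391","Q392","Q393","Q394","Q6410","Q6411","Q6412","Q6419","Q790","Q791","Q792","Q793","Q794","Q7951"]
def pvElst8 : List String := ["P270","P271","P278","P279"]
def pvElst9 : List String := ["F3481"]
def pvElst10 : List String := ["D66","D67"]

-- 'for dx in (dx for dx in codes if dx in cc_dct): cc_dct[dx] = label'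
def pvUpdIf (d : PySem.Dict String String) (label : String) (codes : List String) : PySem.Dict String String :=
  codes.foldl (fun d dx => if d.contains dx then d.insert dx label else d) d

def apply_agesex_edits (cc_dct : List (String × String)) (age : Int) (sex : String) : List (String × String) :=
  let d0 := PySem.Dict.ofList cc_dct
  let d1 := if age < 18 then pvUpdIf (pvUpdIf d0 "HHS_HCC009" pvElst0) "HHS_HCC161" pvElst1 else d0
  let d2 := if age < 2 then pvUpdIf (pvUpdIf d1 "HHS_HCC042" pvElst2) "HHS_HCC_NA" pvElst4 else d1
  let d3 := if age < 50 then pvUpdIf d2 "HHS_HCC011" pvElst3 else d2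
  let d4 := if age > 1 then pvUpdIf d3 "HHS_HCC_NA" pvElst5 else d3
  let d5 := if age ≥ 1 then pvUpdIf d4 "HHS_HCC097" pvElst6 else d4
  let d6 := if age ≥ 2 then pvUpdIf (pvUpdIf d5 "HHS_HCC_NA" pvElst7) "HHS_HCC162" pvElst8 else d5
  let d7 := if age < 6 ∨ age > 18 then pvUpdIf d6 "HHS_HCC_NA" pvElst9 else d6
  let d8 := if sex = "F" then pvUpdIf d7 "HHS_HCC075" pvElst10 else d7
  d8.items.filter (fun p => p.2 ≠ "HHS_HCC_NA")

-- ===== PORT B =====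
-- Source B generates the regular code families by comprehension; ported as flatMap/map over
-- the same character strings (String.push c is Python's s + c for a one-char string).
def pvB0 : List String := (["C910", "C950"].flatMap (fun p => "012".toList.map (fun d => p.push d))) ++ ("019".toList.flatMap (fun t => "012".toList.map (fun d => (("C74".push t).push d))))
def pvB1 : List String := ["J410", "J411", "J418", "J42", "J440", "J441"]
def pvB2 : List String := ("123456".toList.flatMap (fun t => "129".toList.map (fun d => ("K550".push t).push d))) ++ ("0123".toList.map (fun d => "K553".push d))
def pvB3 : List String := "012345689".toList.flatMap (fun a => "12".toList.flatMap (fun b => "129".toList.map (fun c => (("C50".push a).push b).push c)))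
def pvB4 : List String := ("01289".toList.map (fun d => "J43".push d)) ++ ["J449", "J982", "J983"]
def pvB5 : List String :=
  ("01".toList.flatMap (fun a => "0123456789".toList.map (fun b => ("P05".push a).push b)))
  ++ ["P052", "P059"]
  ++ ("0123".toList.map (fun d => "P070".push d))
  ++ ("045678".toList.map (fun d => "P071".push d))
  ++ ("0123456".toList.map (fun d => "P072".push d))
  ++ ("0123456789".toList.map (fun d => "P073".push d))
  ++ ["P080", "P081", "P0821", "P0822"]
def pvB6 : List String := ["Q894"]
def pvB7 : List String :=
  ("189".toList.map (fun d => "K55".push d))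
  ++ ((["", "1", "2", "3", "4", "5", "6", "7", "8", "9", "A"]).map (fun s => "P041" ++ s))
  ++ ["P042", "P043"]
  ++ ("0129".toList.map (fun d => "P044".push d))
  ++ ["P045", "P046", "P048", "P0481", "P0489", "P049"]
  ++ ["P930", "P938", "P961", "P962"]
  ++ ("01234".toList.map (fun d => "Q39".push d))
  ++ ("0129".toList.map (fun d => "Q641".push d))
  ++ ("01234".toList.map (fun d => "Q79".push d))
  ++ ["Q7951"]
def pvB8 : List String := "0189".toList.map (fun d => "P27".push d)
def pvB9 : List String := ["F3481"]
def pvB10 : List String := ["D66", "D67"]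

-- Source B's classify(dx): first match over the edit blocks, later blocks of A tested first
def pvClassify (dx : String) (age : Int) (sex : String) : Option String :=
  if sex = "F" ∧ dx ∈ pvB10 then some "HHS_HCC075"
  else if (age < 6 ∨ age > 18) ∧ dx ∈ pvB9 then some "HHS_HCC_NA"
  else if age ≥ 2 ∧ dx ∈ pvB8 then some "HHS_HCC162"
  else if age ≥ 2 ∧ dx ∈ pvB7 then some "HHS_HCC_NA"
  else if age ≥ 1 ∧ dx ∈ pvB6 then some "HHS_HCC097"
  else if age > 1 ∧ dx ∈ pvB5 then some "HHS_HCC_NA"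
  else if age < 50 ∧ dx ∈ pvB3 then some "HHS_HCC011"
  else if age < 2 ∧ dx ∈ pvB4 then some "HHS_HCC_NA"
  else if age < 2 ∧ dx ∈ pvB2 then some "HHS_HCC042"
  else if age < 18 ∧ dx ∈ pvB1 then some "HHS_HCC161"
  else if age < 18 ∧ dx ∈ pvB0 then some "HHS_HCC009"
  else none

def apply_agesex_edits_alt (cc_dct : List (String × String)) (age : Int) (sex : String) : List (String × String) :=
  let d := PySem.Dict.ofList cc_dct
  -- 'for dx in list(cc_dct): lab = classify(dx); if lab is not None: cc_dct[dx] = lab'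
  let d' := d.keys.foldl (fun d dx =>
    match pvClassify dx age sex with
    | some lab => d.insert dx lab
    | none => d) d
  d'.items.filter (fun p => p.2 ≠ "HHS_HCC_NA")

-- ===== PRECONDITION & SPEC =====
def Spec_apply_agesex_edits (cc_dct : List (String × String)) (age : Int) (sex : String) (out : List (String × String)) : Prop := out = apply_agesex_edits_alt cc_dct age sex
instance (cc_dct : List (String × String)) (age : Int) (sex : String) (out : List (String × String)) : Decidable (Spec_apply_agesex_edits cc_dct age sex out) := by unfold Spec_apply_agesex_edits; infer_instance

-- ===== CLAIM (what is proved, stated in full; the proofs are below) =====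
def Claim_equal_apply_agesex_edits : Prop := ∀ (cc_dct : List (String × String)) (age : Int) (sex : String), Dom_apply_agesex_edits cc_dct age sex → Spec_apply_agesex_edits cc_dct age sex (apply_agesex_edits cc_dct age sex)

-- ===== LEMMAS AND PROOFS =====

-- proof-side view of A: the list of active (codes, label) blocks, in A's block order
def pvBlocks (age : Int) (sex : String) : List (List String × String) :=
  (if age < 18 then [(pvElst0, "HHS_HCC009"), (pvElst1, "HHS_HCC161")] else []) ++
  (if age < 2 then [(pvElst2, "HHS_HCC042"), (pvElst4, "HHS_HCC_NA")] else []) ++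
  (if age < 50 then [(pvElst3, "HHS_HCC011")] else []) ++
  (if age > 1 then [(pvElst5, "HHS_HCC_NA")] else []) ++
  (if age ≥ 1 then [(pvElst6, "HHS_HCC097")] else []) ++
  (if age ≥ 2 then [(pvElst7, "HHS_HCC_NA"), (pvElst8, "HHS_HCC162")] else []) ++
  (if age < 6 ∨ age > 18 then [(pvElst9, "HHS_HCC_NA")] else []) ++
  (if sex = "F" then [(pvElst10, "HHS_HCC075")] else [])

def pvAddBlock (m : PySem.Dict String String) (b : List String × String) : PySem.Dict String String :=
  b.1.foldl (fun m dx => m.insert dx b.2) m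

-- first-match lookup over a block list (pvBlocks reversed = last-wins)
def pvLook (dx : String) : List (List String × String) → Option String
  | [] => none
  | b :: bs => if dx ∈ b.1 then some b.2 else pvLook dx bs

-- A's conditional per-list edit, item-wise
theorem pvUpdIf_items (codes : List String) (d : PySem.Dict String String) (l : String) :
    (pvUpdIf d l codes).items
      = d.items.map (fun p => if p.1 ∈ codes then (p.1, l) else p) := by
  induction codes generalizing d with
  | nil => simp [pvUpdIf]
  | cons c cs ih =>
    show (pvUpdIf (if d.contains c then d.insert c l else d) l cs).items = _
    rw [ih]
    by_cases hc : d.contains c = true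
    · rw [if_pos hc, PySem.Dict.items_insert_of_contains d l hc, List.map_map]
      refine List.map_congr_left (fun p _ => ?_)
      by_cases h1 : p.1 = c <;> by_cases h2 : p.1 ∈ cs <;>
        simp [Function.comp, h1, h2]
    · rw [if_neg hc]
      refine List.map_congr_left (fun p hp => ?_)
      have hne : p.1 ≠ c := by
        intro h
        exact hc ((PySem.Dict.contains_iff_mem_keys d c).2 (h ▸ List.mem_map_of_mem hp))
      by_cases h2 : p.1 ∈ cs <;> simp [hne, h2]

-- the edit-table build, lookup-wise
theorem pvAddBlock_get? (codes : List String) (m : PySem.Dict String String) (l dx : String) :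
    ((codes.foldl (fun m c => m.insert c l) m).get? dx)
      = if dx ∈ codes then some l else m.get? dx := by
  induction codes generalizing m with
  | nil => simp
  | cons c cs ih =>
    show ((cs.foldl _ (m.insert c l)).get? dx) = _
    rw [ih, PySem.Dict.get?_insert]
    by_cases h1 : dx ∈ cs <;> by_cases h2 : dx = c <;> simp [h1, h2]

-- the fold of pvAddBlock, lookup-wise, is first-match over the reversed blocks
theorem pvGet_eq_look (dx : String) (bs : List (List String × String)) :
    ((bs.foldl pvAddBlock PySem.Dict.empty).get? dx) = pvLook dx bs.reverse := by
  induction bs using List.reverseRecOn with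
  | nil => simp [pvLook]
  | append_singleton bs b ih =>
    rw [List.foldl_append, List.foldl_cons, List.foldl_nil]
    show ((b.1.foldl (fun (m : PySem.Dict String String) c => m.insert c b.2) _).get? dx) = _
    rw [pvAddBlock_get?, ih, List.reverse_append]
    simp [pvLook]

theorem pvLook_append (dx : String) (xs ys : List (List String × String)) :
    pvLook dx (xs ++ ys)
      = match pvLook dx xs with
        | some v => some v
        | none => pvLook dx ys := by
  induction xs with
  | nil => simp [pvLook]
  | cons b bs ih =>
    by_cases h : dx ∈ b.1 <;> simp [pvLook, h, ih]

-- a sequence of A-style edits, item-wise, equals one lookup in the edit table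
theorem pvBlocks_foldl_items (blocks : List (List String × String)) (d : PySem.Dict String String) :
    (blocks.foldl (fun d b => pvUpdIf d b.2 b.1) d).items
      = d.items.map (fun p =>
          match (blocks.foldl pvAddBlock PySem.Dict.empty).get? p.1 with
          | some v => (p.1, v)
          | none => p) := by
  induction blocks using List.reverseRecOn generalizing d with
  | nil => simp
  | append_singleton bs b ih =>
    rw [List.foldl_append, List.foldl_append]
    show (pvUpdIf _ b.2 b.1).items = _
    rw [pvUpdIf_items, ih d, List.map_map]
    refine List.map_congr_left (fun p _ => ?_)
    show (fun q => if q.1 ∈ b.1 then (q.1, b.2) else q)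
        (match (bs.foldl pvAddBlock PySem.Dict.empty).get? p.1 with
          | some v => (p.1, v) | none => p) = _
    show _ = (match (pvAddBlock (bs.foldl pvAddBlock PySem.Dict.empty) b).get? p.1 with
          | some v => (p.1, v) | none => p)
    rw [show pvAddBlock (bs.foldl pvAddBlock PySem.Dict.empty) b
          = b.1.foldl (fun m dx => m.insert dx b.2) (bs.foldl pvAddBlock PySem.Dict.empty) from rfl,
        pvAddBlock_get?]
    by_cases h1 : p.1 ∈ b.1 <;>
      cases h : (bs.foldl pvAddBlock PySem.Dict.empty).get? p.1 <;> simp [h1]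

-- B's generated code families equal A's literal tables
theorem pvB0_eq : pvB0 = pvElst0 := by decide
theorem pvB1_eq : pvB1 = pvElst1 := by decide
theorem pvB2_eq : pvB2 = pvElst2 := by decide
theorem pvB3_eq : pvB3 = pvElst3 := by decide
theorem pvB4_eq : pvB4 = pvElst4 := by decide
theorem pvB5_eq : pvB5 = pvElst5 := by decide
theorem pvB6_eq : pvB6 = pvElst6 := by decide
theorem pvB7_eq : pvB7 = pvElst7 := by decide
theorem pvB8_eq : pvB8 = pvElst8 := by decide
theorem pvB9_eq : pvB9 = pvElst9 := by decide
theorem pvB10_eq : pvB10 = pvElst10 := by decide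

-- distribute a guard over a one/two-entry first-match group
theorem pvIf_and1 {α : Type} (c m : Prop) [Decidable c] [Decidable m] (v r : α) :
    (if c then (if m then v else r) else r) = if c ∧ m then v else r := by
  by_cases hc : c <;> by_cases hm : m <;> simp [hc, hm]

theorem pvIf_and2 {α : Type} (c m1 m2 : Prop) [Decidable c] [Decidable m1] [Decidable m2]
    (v1 v2 r : α) :
    (if c then (if m1 then v1 else if m2 then v2 else r) else r)
      = if c ∧ m1 then v1 else if c ∧ m2 then v2 else r := by
  by_cases hc : c <;> by_cases h1 : m1 <;> by_cases h2 : m2 <;> simp [hc, h1, h2]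

theorem pvLook_if (dx : String) (c : Prop) [Decidable c] (xs : List (List String × String)) :
    pvLook dx (if c then xs else []) = if c then pvLook dx xs else none := by
  split <;> simp [pvLook]

-- B's classify is exactly the edit-table lookup for A's active blocks
set_option maxHeartbeats 4000000 in
theorem pvClassify_eq (dx : String) (age : Int) (sex : String) :
    pvClassify dx age sex
      = ((pvBlocks age sex).foldl pvAddBlock PySem.Dict.empty).get? dx := by
  rw [pvGet_eq_look, pvBlocks]
  simp only [List.reverse_append, apply_ite List.reverse, List.reverse_nil, List.reverse_cons,
    List.nil_append, List.cons_append, pvLook_append, pvLook_if]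
  simp only [pvLook, pvClassify]
  rw [pvB0_eq, pvB1_eq, pvB2_eq, pvB3_eq, pvB4_eq, pvB5_eq, pvB6_eq, pvB7_eq, pvB8_eq,
    pvB9_eq, pvB10_eq]
  rw [pvIf_and1 (sex = "F"), pvIf_and1 (age < 6 ∨ age > 18), pvIf_and2 (age ≥ 2),
    pvIf_and1 (age ≥ 1), pvIf_and1 (age > 1), pvIf_and1 (age < 50), pvIf_and2 (age < 2),
    pvIf_and2 (age < 18)]
  split_ifs <;> rfl

-- B's single pass over the dict keys, item-wise
theorem pvPass_items (ks : List String) (g : String → Option String) :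
    ∀ (d : PySem.Dict String String), (∀ k ∈ ks, d.contains k = true) →
    (ks.foldl (fun d dx =>
        match g dx with
        | some v => d.insert dx v
        | none => d) d).items
      = d.items.map (fun p =>
          if p.1 ∈ ks then
            (match g p.1 with
             | some v => (p.1, v)
             | none => p)
          else p) := by
  induction ks with
  | nil => intro d _; simp
  | cons k ks ih =>
    intro d hks
    have hk : d.contains k = true := hks k (by simp)
    simp only [List.foldl_cons]
    cases h : g k with
    | none =>
      rw [ih d (fun k' hk' => hks k' (List.mem_cons_of_mem _ hk'))]
      refine List.map_congr_left (fun p hp => ?_)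
      by_cases h1 : p.1 = k <;> by_cases h2 : p.1 ∈ ks <;>
        simp [h1, h2, h]
    | some v =>
      have hstep : ∀ k', d.contains k' = true → (d.insert k v).contains k' = true := by
        intro k' hk'
        rw [PySem.Dict.contains_insert]
        simp [hk']
      rw [ih (d.insert k v) (fun k' hk' => hstep k' (hks k' (List.mem_cons_of_mem _ hk'))),
          PySem.Dict.items_insert_of_contains d v hk, List.map_map]
      refine List.map_congr_left (fun p hp => ?_)
      by_cases h1 : p.1 = k <;> by_cases h2 : p.1 ∈ ks <;>
        simp [h1, h2, h]

-- unfold a conditional block group under the foldl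
theorem pvFoldl_if_app (c : Prop) [Decidable c] (xs : List (List String × String))
    (d : PySem.Dict String String) :
    ((if c then xs else []).foldl (fun d b => pvUpdIf d b.2 b.1) d)
      = if c then xs.foldl (fun d b => pvUpdIf d b.2 b.1) d else d := by
  split <;> simp

-- ===== VERDICT (by name: the statement is the Claim_ definition above) =====
set_option maxHeartbeats 1000000 in
theorem apply_agesex_edits_spec : Claim_equal_apply_agesex_edits := by
  intro cc_dct age sex _
  show apply_agesex_edits cc_dct age sex = apply_agesex_edits_alt cc_dct age sex
  have hA : apply_agesex_edits cc_dct age sex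
      = ((pvBlocks age sex).foldl (fun d b => pvUpdIf d b.2 b.1)
          (PySem.Dict.ofList cc_dct)).items.filter (fun p => p.2 ≠ "HHS_HCC_NA") := by
    rw [pvBlocks]
    rw [List.foldl_append, List.foldl_append, List.foldl_append, List.foldl_append,
        List.foldl_append, List.foldl_append, List.foldl_append]
    rw [pvFoldl_if_app, pvFoldl_if_app, pvFoldl_if_app, pvFoldl_if_app, pvFoldl_if_app,
        pvFoldl_if_app, pvFoldl_if_app, pvFoldl_if_app]
    rw [List.foldl_cons, List.foldl_cons, List.foldl_cons, List.foldl_cons, List.foldl_cons,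
        List.foldl_cons, List.foldl_cons, List.foldl_cons, List.foldl_cons, List.foldl_cons,
        List.foldl_cons]
    rw [List.foldl_nil, List.foldl_nil, List.foldl_nil, List.foldl_nil, List.foldl_nil,
        List.foldl_nil, List.foldl_nil, List.foldl_nil]
    rfl
  rw [hA, pvBlocks_foldl_items]
  show _ = apply_agesex_edits_alt cc_dct age sex
  rw [apply_agesex_edits_alt]
  rw [pvPass_items _ _ _ (fun k hk => (PySem.Dict.contains_iff_mem_keys _ k).2 hk)]
  congr 1
  refine List.map_congr_left (fun p hp => ?_)
  have hmem : p.1 ∈ (PySem.Dict.ofList cc_dct).keys :=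
    List.mem_map_of_mem hp
  rw [if_pos hmem, pvClassify_eq]
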